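-- pv_equiv track=rewrite | github.com/alvaroortegaangulo/audio-tabs | backend/app/services/musicxml/export.py | _get_preferred_tab_position
-- ===== SOURCE A (Python) =====
-- def _get_preferred_tab_position(midi_note: int) -> tuple[int, int]:
--     """
--     Returns (string, fret) for a given MIDI note.
--     Prioritizes open position (first 5 frets).
--     Standard Tuning: E2(40), A2(45), D3(50), G3(55), B3(59), E4(64).
--     """
--     tuning = [(6, 40), (5, 45), (4, 50), (3, 55), (2, 59), (1, 64)]
--
--     max_fret = 24  # cover up to E6 on a 24-fret guitar
--
--     candidates = []
--     for string_num, open_pitch in tuning: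
--         fret = midi_note - open_pitch
--         if 0 <= fret <= max_fret:
--             candidates.append((string_num, int(fret)))
--
--     if not candidates:
--         # Fallback for very high/low notes not covered (unlikely for guitar range)
--         return (0, 0)
--
--     # Prioritize Open Position (Frets 0-4 usually, let's say 0-5)
--     # Strategy:
--     # 1. Look for open strings (fret 0)
--     # 2. Look for frets 1-5
--     # 3. Use lowest fret available otherwise.
--
--     # Check for 0 (Open strings)
--     zeros = [c for c in candidates if c[1] == 0]
--     if zeros:
--         return zeros[0] # Prefer lower string number? doesn't matter much for same note
--
--     # Check for frets 1-5
--     low_pos = [c for c in candidates if 1 <= c[1] <= 5]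
--     if low_pos:
--         # If multiple, prefer the one on the lower string (higher string_num) -> thicker string?
--         # Or higher string (lower string_num) -> brighter tone?
--         # For beginners, maybe lower fret is king.
--         return min(low_pos, key=lambda x: x[1])
--
--     # Otherwise pick lowest fret available
--     return min(candidates, key=lambda x: x[1])
-- ===== SOURCE B (Python) =====
-- def _get_preferred_tab_position(midi_note: int) -> tuple[int, int]:
--     """Single pass: frets on distinct open pitches are distinct, so the
--     three-tier priority (open string, frets 1-5, lowest fret) collapses to
--     'smallest playable fret wins'. Keep the best (string, fret) as we go."""
--     best = None
--     for string_num, open_pitch in [(6, 40), (5, 45), (4, 50), (3, 55), (2, 59), (1, 64)]: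
--         fret = midi_note - open_pitch
--         if 0 <= fret <= 24 and (best is None or fret < best[1]):
--             best = (string_num, int(fret))
--     return best if best is not None else (0, 0)
-- ===== Notes on version B (the rewrite author's own statement) =====
-- stated objective: simpler
-- what changed: Replaces A's build-candidate-list plus three priority filters (open strings, frets 1-5, overall min) by a single pass over the tuning that keeps the playable (string, fret) with minimal fret, since open pitches are distinct so all three tiers reduce to 'smallest fret wins'.
import Mathlib
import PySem

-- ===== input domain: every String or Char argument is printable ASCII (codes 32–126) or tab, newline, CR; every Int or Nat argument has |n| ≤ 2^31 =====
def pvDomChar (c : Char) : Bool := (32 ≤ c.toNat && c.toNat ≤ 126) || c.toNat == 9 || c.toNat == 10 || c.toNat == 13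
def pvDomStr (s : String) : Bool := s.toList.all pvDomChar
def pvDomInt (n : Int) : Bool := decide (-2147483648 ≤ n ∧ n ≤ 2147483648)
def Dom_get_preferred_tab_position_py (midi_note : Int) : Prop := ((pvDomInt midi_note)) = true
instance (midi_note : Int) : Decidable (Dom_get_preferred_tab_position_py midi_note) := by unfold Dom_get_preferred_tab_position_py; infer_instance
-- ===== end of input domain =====

-- B replaces A's candidate list + three priority filters by a single pass keeping the minimal-fret playable position (simpler).

-- ===== PORT A =====
-- literal transliteration of _get_preferred_tab_position (candidate list, then zeros / frets 1-5 / overall min)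
def get_preferred_tab_position_py (midi_note : Int) : Int × Int :=
  let tuning : List (Int × Int) := [(6, 40), (5, 45), (4, 50), (3, 55), (2, 59), (1, 64)]
  let max_fret : Int := 24
  let candidates : List (Int × Int) :=
    tuning.foldl (fun acc sp =>
      let fret := midi_note - sp.2
      if 0 ≤ fret ∧ fret ≤ max_fret then acc ++ [(sp.1, fret)] else acc) []
  if candidates = [] then (0, 0)
  else
    let zeros := candidates.filter (fun c => c.2 == 0)
    if hz : zeros ≠ [] then zeros.head hz
    else
      let low_pos := candidates.filter (fun c => decide (1 ≤ c.2 ∧ c.2 ≤ 5))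
      if low_pos ≠ [] then (PySem.List.min? low_pos (fun x => x.2)).getD (0, 0)
      else (PySem.List.min? candidates (fun x => x.2)).getD (0, 0)

-- ===== PORT B =====
-- literal transliteration of B (Source B): one fold keeping the best (string, fret) with minimal fret
def get_preferred_tab_position_py_alt (midi_note : Int) : Int × Int :=
  let best : Option (Int × Int) :=
    [(6, 40), (5, 45), (4, 50), (3, 55), (2, 59), (1, 64)].foldl
      (fun (best : Option (Int × Int)) sp =>
        let fret := midi_note - sp.2
        if decide (0 ≤ fret) && decide (fret ≤ 24) && (match best with | none => true | some b => decide (fret < b.2)) then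
          some (sp.1, fret)
        else best) none
  match best with
  | some b => b
  | none => (0, 0)

-- ===== PRECONDITION & SPEC =====
def Spec_get_preferred_tab_position_py (midi_note : Int) (out : Int × Int) : Prop := out = get_preferred_tab_position_py_alt midi_note
instance (midi_note : Int) (out : Int × Int) : Decidable (Spec_get_preferred_tab_position_py midi_note out) := by unfold Spec_get_preferred_tab_position_py; infer_instance

-- ===== CLAIM (what is proved, stated in full; the proofs are below) =====
def Claim_equal_get_preferred_tab_position_py : Prop := ∀ (midi_note : Int), Dom_get_preferred_tab_position_py midi_note → Spec_get_preferred_tab_position_py midi_note (get_preferred_tab_position_py midi_note)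

-- ===== LEMMAS AND PROOFS =====
set_option maxHeartbeats 1000000 in
theorem pv_main (m : Int) : get_preferred_tab_position_py m = get_preferred_tab_position_py_alt m := by
  by_cases hlo : m < 40
  · simp [get_preferred_tab_position_py, get_preferred_tab_position_py_alt, List.foldl,
            show ¬(40 : Int) ≤ m from by omega,
      show ¬(45 : Int) ≤ m from by omega,
      show ¬(50 : Int) ≤ m from by omega,
      show ¬(55 : Int) ≤ m from by omega,
      show ¬(59 : Int) ≤ m from by omega,
      show ¬(64 : Int) ≤ m from by omega]
  · by_cases hhi : 88 < m
    · simp [get_preferred_tab_position_py, get_preferred_tab_position_py_alt, List.foldl,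
                show ¬m ≤ (88 : Int) from by omega,
        show ¬m ≤ (83 : Int) from by omega,
        show ¬m ≤ (79 : Int) from by omega,
        show ¬m ≤ (74 : Int) from by omega,
        show ¬m ≤ (69 : Int) from by omega,
        show ¬m ≤ (64 : Int) from by omega]
    · have h1 : 40 ≤ m := by omega
      have h2 : m ≤ 88 := by omega
      interval_cases m <;> decide

-- ===== VERDICT (by name: the statement is the Claim_ definition above) =====
theorem get_preferred_tab_position_py_spec : Claim_equal_get_preferred_tab_position_py := by
  intro m _
  unfold Spec_get_preferred_tab_position_py
  exact pv_main m
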